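-- pv_equiv track=rewrite | github.com/Sana122996/Strait-of-Hormuz | refresh_hormuz_flow_dashboard.py | extract_hormuz_snippet
-- ===== SOURCE A (Python) =====
-- def extract_hormuz_snippet(body_text: str) -> str:
--     anchors = [
--         "Crossings through the Strait of Hormuz",
--         "Maritime traffic through the Strait of Hormuz",
--         "Traffic data confirms the impact",
--         "Windward analysis tracked just under",
--         "Strait of Hormuz Traffic",
--         "The Strait of Hormuz Is Closed",
--         "Hormuz Traffic Collapses Further",
--     ]
--     positions = [body_text.find(anchor) for anchor in anchors if body_text.find(anchor) >= 0]
--     if not positions: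
--         return body_text[:1200]
--     start = min(positions)
--     return body_text[start:start + 1400]
-- ===== SOURCE B (Python) =====
-- def extract_hormuz_snippet(body_text: str) -> str:
--     anchors = (
--         "Crossings through the Strait of Hormuz",
--         "Maritime traffic through the Strait of Hormuz",
--         "Traffic data confirms the impact",
--         "Windward analysis tracked just under",
--         "Strait of Hormuz Traffic",
--         "The Strait of Hormuz Is Closed",
--         "Hormuz Traffic Collapses Further",
--     )
--     for i in range(len(body_text)):
--         if any(body_text.startswith(a, i) for a in anchors):
--             return body_text[i:i + 1400]
--     return body_text[:1200]
-- ===== Notes on version B (the rewrite author's own statement) =====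
-- stated objective: alternative
-- what changed: B replaces the seven independent full-text find() scans plus a min() over the collected positions with a single left-to-right scan that stops at the first position where any anchor matches.
import Mathlib
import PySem

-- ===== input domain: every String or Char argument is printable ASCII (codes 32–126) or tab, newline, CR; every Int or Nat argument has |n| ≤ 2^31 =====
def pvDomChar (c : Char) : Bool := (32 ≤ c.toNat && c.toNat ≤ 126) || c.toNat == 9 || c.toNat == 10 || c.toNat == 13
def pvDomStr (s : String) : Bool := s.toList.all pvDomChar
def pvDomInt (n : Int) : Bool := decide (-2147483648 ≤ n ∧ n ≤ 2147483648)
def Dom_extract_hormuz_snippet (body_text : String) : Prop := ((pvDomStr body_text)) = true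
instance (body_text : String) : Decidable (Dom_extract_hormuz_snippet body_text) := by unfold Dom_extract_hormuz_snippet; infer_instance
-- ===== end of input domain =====

-- B replaces seven independent find() scans plus min() with one left-to-right scan
-- stopping at the first position any anchor matches (objective: alternative, same cost).

-- ===== PORT A =====
def pvAnchors : List String := [
  "Crossings through the Strait of Hormuz",
  "Maritime traffic through the Strait of Hormuz",
  "Traffic data confirms the impact",
  "Windward analysis tracked just under",
  "Strait of Hormuz Traffic",
  "The Strait of Hormuz Is Closed",
  "Hormuz Traffic Collapses Further"]

def extract_hormuz_snippet (body_text : String) : String :=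
  let positions : List Int := pvAnchors.foldl
    (fun acc anchor =>
      if (0 : Int) ≤ PySem.Str.find body_text anchor
      then acc ++ [PySem.Str.find body_text anchor] else acc) []
  match PySem.List.min? positions (fun x => x) with
  | none => PySem.Str.slice body_text none (some 1200)
  | some start => PySem.Str.slice body_text (some start) (some (start + 1400))

-- ===== PORT B =====
def pvAnchorsB : List String := [
  "Crossings through the Strait of Hormuz",
  "Maritime traffic through the Strait of Hormuz",
  "Traffic data confirms the impact",
  "Windward analysis tracked just under",
  "Strait of Hormuz Traffic",
  "The Strait of Hormuz Is Closed",
  "Hormuz Traffic Collapses Further"]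

-- the 'for i in range(len(body_text))' scan: first index whose suffix starts with some anchor
def pvScan (anchors : List String) : List Char → Nat → Option Nat
  | [], _ => none
  | c :: rest, i =>
    if anchors.any (fun a => PySem.Chars.startswith (c :: rest) a.toList) then some i
    else pvScan anchors rest (i + 1)

def extract_hormuz_snippet_alt (body_text : String) : String :=
  match pvScan pvAnchorsB body_text.toList 0 with
  | some i => PySem.Str.slice body_text (some (i : Int)) (some ((i : Int) + 1400))
  | none => PySem.Str.slice body_text none (some 1200)

-- ===== PRECONDITION & SPEC =====
def Spec_extract_hormuz_snippet (body_text : String) (out : String) : Prop := out = extract_hormuz_snippet_alt body_text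
instance (body_text : String) (out : String) : Decidable (Spec_extract_hormuz_snippet body_text out) := by unfold Spec_extract_hormuz_snippet; infer_instance

-- ===== CLAIM (what is proved, stated in full; the proofs are below) =====
def Claim_equal_extract_hormuz_snippet : Prop := ∀ (body_text : String), Dom_extract_hormuz_snippet body_text → Spec_extract_hormuz_snippet body_text (extract_hormuz_snippet body_text)

-- ===== LEMMAS AND PROOFS =====

-- "some anchor matches at the head of l"
def pvQ (l : List Char) : Bool := pvAnchorsB.any (fun a => PySem.Chars.startswith l a.toList)

lemma pvQ_iff (l : List Char) : pvQ l = true ↔ ∃ a ∈ pvAnchorsB, a.toList <+: l := by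
  simp [pvQ, List.any_eq_true, PySem.Chars.startswith_iff]

lemma pvAnchors_ne_nil : ∀ a ∈ pvAnchorsB, a.toList ≠ [] := by decide

lemma pvScan_none (l : List Char) (i : Nat)
    (h : pvScan pvAnchorsB l i = none) : ∀ k < l.length, pvQ (l.drop k) = false := by
  induction l generalizing i with
  | nil => intro k hk; simp at hk
  | cons c rest ih =>
    intro k hk
    by_cases hq : pvAnchorsB.any (fun a => PySem.Chars.startswith (c :: rest) a.toList) = true
    · simp [pvScan, hq] at h
    · cases k with
      | zero => simpa [pvQ] using hq
      | succ k' =>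
        have h' : pvScan pvAnchorsB rest (i + 1) = none := by
          simpa [pvScan, hq] using h
        exact ih (i + 1) h' k' (by simpa using hk)

lemma pvScan_some (l : List Char) (i j : Nat)
    (h : pvScan pvAnchorsB l i = some j) :
    i ≤ j ∧ j - i < l.length ∧ pvQ (l.drop (j - i)) = true ∧ ∀ k < j - i, pvQ (l.drop k) = false := by
  induction l generalizing i with
  | nil => simp [pvScan] at h
  | cons c rest ih =>
    by_cases hq : pvAnchorsB.any (fun a => PySem.Chars.startswith (c :: rest) a.toList) = true
    · have hj : j = i := by simpa [pvScan, hq] using h.symm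
      subst hj
      refine ⟨le_rfl, by simp, by simpa [pvQ] using hq, by omega⟩
    · have h' : pvScan pvAnchorsB rest (i + 1) = some j := by
        simpa [pvScan, hq] using h
      obtain ⟨h1, h2, h3, h4⟩ := ih (i + 1) h'
      refine ⟨by omega, by simp; omega, ?_, ?_⟩
      · have : j - i = (j - (i + 1)) + 1 := by omega
        rw [this]; simpa using h3
      · intro k hk
        cases k with
        | zero => simpa [pvQ] using hq
        | succ k' =>
          have : k' < j - (i + 1) := by omega
          simpa using h4 k' this

-- find points at the first matching position
lemma pv_find_eq_first (s sub : List Char) (m : Nat)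
    (h1 : sub <+: s.drop m) (h2 : ∀ k < m, ¬ sub <+: s.drop k) :
    PySem.Chars.find s sub = (m : Int) := by
  have hin : PySem.Chars.isIn sub s = true :=
    (PySem.Chars.exists_prefix_drop_iff_isIn (s := s) (sub := sub)).mp ⟨m, h1⟩
  have hinf : sub <:+: s := (PySem.Chars.isIn_iff_infix (sub := sub) (s := s)).mp hin
  have hnn : 0 ≤ PySem.Chars.find s sub := (PySem.Chars.find_nonneg_iff (s := s) (sub := sub)).mpr hinf
  obtain ⟨hpre, hmin⟩ := PySem.Chars.find_spec (s := s) (sub := sub) hnn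
  have hge : m ≤ (PySem.Chars.find s sub).toNat := by
    by_contra hlt
    exact h2 _ (by omega) hpre
  have hle : (PySem.Chars.find s sub).toNat ≤ m := by
    by_contra hlt
    exact hmin m (by omega) h1
  have : (PySem.Chars.find s sub).toNat = m := by omega
  omega

-- ===== VERDICT (by name: the statement is the Claim_ definition above) =====
theorem extract_hormuz_snippet_spec : Claim_equal_extract_hormuz_snippet := by
  intro body_text _
  unfold Spec_extract_hormuz_snippet extract_hormuz_snippet extract_hormuz_snippet_alt
  have hposeq : pvAnchors.foldl
      (fun acc anchor =>
        if (0 : Int) ≤ PySem.Str.find body_text anchor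
        then acc ++ [PySem.Str.find body_text anchor] else acc) [] =
      (pvAnchors.filter (fun a => decide ((0 : Int) ≤ PySem.Str.find body_text a))).map
        (fun a => PySem.Str.find body_text a) := by
    simpa using PySem.List.foldl_append_ite
      (p := fun a => (0 : Int) ≤ PySem.Str.find body_text a)
      (f := fun a => PySem.Str.find body_text a) (l := pvAnchors) (acc := [])
  set cs := body_text.toList with hcs
  cases hscan : pvScan pvAnchorsB cs 0 with
  | none =>
    have hall := pvScan_none cs 0 hscan
    have hfilter : pvAnchors.filter (fun a => decide ((0 : Int) ≤ PySem.Str.find body_text a)) = [] := by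
      rw [List.filter_eq_nil_iff]
      intro a ha
      have hnot : ¬ a.toList <:+: cs := by
        intro hinf
        have hin : PySem.Chars.isIn a.toList cs = true :=
          (PySem.Chars.isIn_iff_infix (sub := a.toList) (s := cs)).mpr hinf
        obtain ⟨j, hj⟩ :=
          (PySem.Chars.exists_prefix_drop_iff_isIn (s := cs) (sub := a.toList)).mpr hin
        by_cases hjl : j < cs.length
        · have hf := hall j hjl
          have ht := (pvQ_iff (cs.drop j)).mpr ⟨a, ha, hj⟩
          simp [ht] at hf
        · have hd : cs.drop j = [] := List.drop_eq_nil_of_le (by omega)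
          rw [hd] at hj
          exact pvAnchors_ne_nil a ha (List.prefix_nil.mp hj)
      have hfind : PySem.Chars.find cs a.toList = -1 :=
        (PySem.Chars.find_eq_neg_one_iff (s := cs) (sub := a.toList)).mpr hnot
      simp [PySem.Str.find_eq, ← hcs, hfind]
    simp only [hposeq, hfilter, List.map_nil]
    rfl
  | some m =>
    obtain ⟨_, hmlen, hqm, hbefore⟩ := pvScan_some cs 0 m hscan
    simp only [Nat.sub_zero] at hmlen hqm hbefore
    obtain ⟨a0, ha0, hpre0⟩ := (pvQ_iff _).mp hqm
    have hnob : ∀ k < m, ∀ b ∈ pvAnchorsB, ¬ b.toList <+: cs.drop k := by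
      intro k hk b hb hpb
      have hf := hbefore k hk
      have ht := (pvQ_iff (cs.drop k)).mpr ⟨b, hb, hpb⟩
      simp [ht] at hf
    have hfa0 : PySem.Chars.find cs a0.toList = (m : Int) :=
      pv_find_eq_first cs a0.toList m hpre0 (fun k hk => hnob k hk a0 ha0)
    set positions := (pvAnchors.filter (fun a => decide ((0 : Int) ≤ PySem.Str.find body_text a))).map
        (fun a => PySem.Str.find body_text a) with hpos
    have hab : pvAnchors = pvAnchorsB := rfl
    have hmem : (m : Int) ∈ positions := by
      rw [hpos]
      refine List.mem_map.mpr ⟨a0, List.mem_filter.mpr ⟨by rw [hab]; exact ha0, ?_⟩, ?_⟩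
      · simp [PySem.Str.find_eq, ← hcs, hfa0]
      · simp [PySem.Str.find_eq, ← hcs, hfa0]
    have hlb : ∀ p ∈ positions, (m : Int) ≤ p := by
      intro p hp
      rw [hpos] at hp
      obtain ⟨b, hbf, hbp⟩ := List.mem_map.mp hp
      obtain ⟨hb, hb0⟩ := List.mem_filter.mp hbf
      rw [hab] at hb
      have hb0' : (0 : Int) ≤ PySem.Chars.find cs b.toList := by
        simpa [PySem.Str.find_eq, ← hcs] using (of_decide_eq_true hb0)
      obtain ⟨hpreb, _⟩ := PySem.Chars.find_spec (s := cs) (sub := b.toList) hb0'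
      have hge : m ≤ (PySem.Chars.find cs b.toList).toNat := by
        by_contra hlt
        exact hnob _ (by omega) b hb hpreb
      have : p = PySem.Chars.find cs b.toList := by
        simpa [PySem.Str.find_eq, ← hcs] using hbp.symm
      omega
    have hne : positions ≠ [] := by
      intro hnil; rw [hnil] at hmem; exact absurd hmem (List.not_mem_nil)
    obtain ⟨p, hpmin⟩ : ∃ p, PySem.List.min? positions (fun x => x) = some p := by
      cases hm : PySem.List.min? positions (fun x => x) with
      | none => exact absurd ((PySem.List.min?_eq_none_iff positions (fun x => x)).mp hm) hne
      | some p => exact ⟨p, rfl⟩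
    have hpmem : p ∈ positions := PySem.List.min?_mem hpmin
    have hple : p ≤ (m : Int) := PySem.List.min?_isMin hpmin _ hmem
    have hpge : (m : Int) ≤ p := hlb p hpmem
    have hpm : p = (m : Int) := le_antisymm hple hpge
    simp only [hposeq, hpmin, hpm]
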